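-- pv_equiv track=rewrite | github.com/patricktsandin/google-foobar | level1/challenge1.py | solution
-- ===== SOURCE A (Python) =====
-- def solution(data, n):
--     """
--     Given a list of ID numbers and a limit, return the list without the ID
--     numbers which appear more often than the limit.
--     solution([1, 1, 2, 3, 3, 3, 4, 5], 2) --> [2, 4, 5]
--     """
--     counter = {}
--     for id_number in data:
--         if id_number not in counter:
--             counter[id_number] = 1
--         else:
--             counter[id_number] += 1
--     data = [
--         id_number
--         for id_number in data
--         if counter[id_number] <= n
--     ]
--     return data
-- ===== SOURCE B (Python) =====
-- def solution(data, n):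
--     # Sort a copy, scan it run by run collecting the over-limit ids into a set,
--     # then filter the original list by membership in that set.
--     s = sorted(data)
--     bad = set()
--     i = 0
--     while i < len(s):
--         head = s[i]
--         j = i + 1
--         while j < len(s) and s[j] == head:
--             j += 1
--         if j - i > n:
--             bad.add(head)
--         i = j
--     return [x for x in data if x not in bad]
-- ===== Notes on version B (the rewrite author's own statement) =====
-- stated objective: alternative
-- what changed: Replaces A's frequency dict with sort-then-scan: sort a copy, walk it run by run collecting ids whose run exceeds n into a set, then filter the original list by set membership.
import Mathlib
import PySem

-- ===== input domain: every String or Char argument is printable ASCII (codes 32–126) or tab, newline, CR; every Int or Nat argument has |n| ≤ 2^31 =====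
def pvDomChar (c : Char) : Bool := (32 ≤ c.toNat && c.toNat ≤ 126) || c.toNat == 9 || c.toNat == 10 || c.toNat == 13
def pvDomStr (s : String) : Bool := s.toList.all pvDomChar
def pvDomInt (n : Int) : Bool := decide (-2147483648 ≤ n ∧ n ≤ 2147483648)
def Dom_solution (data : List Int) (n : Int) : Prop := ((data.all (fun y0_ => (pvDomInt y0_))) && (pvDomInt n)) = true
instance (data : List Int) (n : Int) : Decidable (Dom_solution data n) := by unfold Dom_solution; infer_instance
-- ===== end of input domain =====

-- B replaces A's frequency dict with sort-then-scan: collect over-limit ids from the runs of a sorted copy into a set, then filter the original list; alternative algorithm, no speed claim.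

-- ===== PORT A =====
def solution (data : List Int) (n : Int) : List Int :=
  let counter : PySem.Dict Int Int :=
    data.foldl (fun d x => if d.contains x then d.insert x (d.getD x 0 + 1) else d.insert x 1)
      PySem.Dict.empty
  data.filter (fun x => decide (counter.getD x 0 ≤ n))

-- ===== PORT B =====
-- inner while loop of Source B: advance j past the run of elements equal to head
-- (the nested dite/ite is Python's short-circuit 'j < len(s) and s[j] == head')
def runEnd (s : List Int) (head : Int) (j : Nat) : Nat :=
  if h : j < s.length then
    if s[j] = head then runEnd s head (j + 1) else j
  else j
  termination_by s.length - j

lemma runEnd_ge (s : List Int) (head : Int) (j : Nat) : j ≤ runEnd s head j := by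
  induction j using runEnd.induct s head with
  | case1 j h he ih => rw [runEnd, dif_pos h, if_pos he]; omega
  | case2 j h he => rw [runEnd, dif_pos h, if_neg he]
  | case3 j h => rw [runEnd, dif_neg h]

-- outer while loop of Source B: consume one run per step, collecting over-limit heads
def scanRuns (n : Int) (s : List Int) (i : Nat) : PySem.Set Int :=
  if h : i < s.length then
    if n < (runEnd s s[i] (i + 1) : Int) - (i : Int) then
      (scanRuns n s (runEnd s s[i] (i + 1))).add s[i]
    else scanRuns n s (runEnd s s[i] (i + 1))
  else PySem.Set.empty
  termination_by s.length - i
  decreasing_by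
    all_goals
      have := runEnd_ge s s[i] (i + 1)
      omega

def solution_alt (data : List Int) (n : Int) : List Int :=
  let bad := scanRuns n (PySem.List.sorted data (fun x => x) false) 0
  data.filter (fun x => !(PySem.Set.contains bad x))

-- ===== PRECONDITION & SPEC =====
def Spec_solution (data : List Int) (n : Int) (out : List Int) : Prop := out = solution_alt data n
instance (data : List Int) (n : Int) (out : List Int) : Decidable (Spec_solution data n out) := by unfold Spec_solution; infer_instance

-- ===== CLAIM (what is proved, stated in full; the proofs are below) =====
def Claim_equal_solution : Prop := ∀ (data : List Int) (n : Int), Dom_solution data n → Spec_solution data n (solution data n)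

-- ===== LEMMAS AND PROOFS =====
-- proof helper: the run scan phrased structurally on the suffix (consume takeWhile/dropWhile)
def badRuns (n : Int) : List Int → PySem.Set Int
  | [] => PySem.Set.empty
  | head :: tl =>
      if n < 1 + ((tl.takeWhile (· == head)).length : Int) then
        (badRuns n (tl.dropWhile (· == head))).add head
      else badRuns n (tl.dropWhile (· == head))
  termination_by s => s.length
  decreasing_by
    all_goals
      simp only [List.length_cons]
      exact Nat.lt_succ_of_le (List.length_dropWhile_le _ _)

-- runEnd walks exactly past the equal prefix of the suffix starting at j
lemma drop_runEnd (s : List Int) (head : Int) (j : Nat) :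
    s.drop (runEnd s head j) = (s.drop j).dropWhile (· == head) := by
  induction j using runEnd.induct s head with
  | case1 j h he ih =>
      rw [runEnd, dif_pos h, if_pos he, ih]
      rw [List.drop_eq_getElem_cons h]
      simp [he]
  | case2 j h he =>
      rw [runEnd, dif_pos h, if_neg he]
      conv_rhs => rw [List.drop_eq_getElem_cons h, List.dropWhile_cons]
      simp only [beq_iff_eq, if_neg he]
      exact List.drop_eq_getElem_cons h
  | case3 j h =>
      rw [runEnd, dif_neg h]
      rw [List.drop_eq_nil_of_le (by omega)]
      simp

lemma runEnd_sub (s : List Int) (head : Int) (j : Nat) :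
    runEnd s head j - j = ((s.drop j).takeWhile (· == head)).length := by
  induction j using runEnd.induct s head with
  | case1 j h he ih =>
      rw [runEnd, dif_pos h, if_pos he]
      have hge := runEnd_ge s head (j + 1)
      rw [List.drop_eq_getElem_cons h]
      simp only [List.takeWhile_cons, he, beq_self_eq_true, if_true, List.length_cons]
      omega
  | case2 j h he =>
      rw [runEnd, dif_pos h, if_neg he]
      conv_rhs => rw [List.drop_eq_getElem_cons h]
      rw [List.takeWhile_cons]
      simp [he]
  | case3 j h =>
      rw [runEnd, dif_neg h]
      rw [List.drop_eq_nil_of_le (by omega)]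
      simp

-- the index scan equals the structural scan of the remaining suffix
lemma scanRuns_eq_badRuns (n : Int) (s : List Int) (i : Nat) :
    scanRuns n s i = badRuns n (s.drop i) := by
  induction i using scanRuns.induct n s with
  | case1 i h hcond ih =>
      rw [scanRuns, dif_pos h, if_pos hcond]
      rw [List.drop_eq_getElem_cons h, badRuns]
      have h1 := runEnd_sub s s[i] (i + 1)
      have h2 := drop_runEnd s s[i] (i + 1)
      have hge := runEnd_ge s s[i] (i + 1)
      rw [if_pos (by omega)]
      rw [ih, ← h2]
  | case2 i h hcond ih =>
      rw [scanRuns, dif_pos h, if_neg hcond]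
      rw [List.drop_eq_getElem_cons h, badRuns]
      have h1 := runEnd_sub s s[i] (i + 1)
      have h2 := drop_runEnd s s[i] (i + 1)
      have hge := runEnd_ge s s[i] (i + 1)
      rw [if_neg (by omega)]
      rw [ih, ← h2]
  | case3 i h =>
      rw [scanRuns, dif_neg h]
      rw [List.drop_eq_nil_of_le (by omega)]
      simp [badRuns]

lemma take_eq_head (head : Int) (tl : List Int) :
    ∀ y ∈ tl.takeWhile (· == head), y = head := by
  intro y hy
  simpa using List.mem_takeWhile_imp hy

-- on a sorted list the head's run is its whole occurrence group: none left after dropWhile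
lemma count_drop_head (head : Int) (tl : List Int)
    (hs : (head :: tl).Pairwise (· ≤ ·)) :
    (tl.dropWhile (· == head)).count head = 0 := by
  rw [List.count_eq_zero]
  intro hmem
  have hall : ∀ z ∈ tl, head ≤ z := (List.pairwise_cons.mp hs).1
  cases hr : tl.dropWhile (· == head) with
  | nil => simp [hr] at hmem
  | cons y ys =>
      have hyne : y ≠ head := by
        have h := List.head_dropWhile_not (p := (· == head)) (l := tl) (by simp [hr])
        have hy : (tl.dropWhile (· == head)).head (by simp [hr]) = y := by simp [hr]
        rw [hy] at h
        intro he
        rw [he] at h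
        simp at h
      have hy_in_tl : y ∈ tl := (List.dropWhile_sublist _).subset (by rw [hr]; simp)
      have hylt : head < y := lt_of_le_of_ne (hall y hy_in_tl) (Ne.symm hyne)
      have hrest_pw : (y :: ys).Pairwise (· ≤ ·) :=
        hr ▸ (hs.of_cons.sublist (List.dropWhile_sublist _))
      rw [hr, List.mem_cons] at hmem
      rcases hmem with hmem | hmem
      · exact hyne (by omega)
      · have := (List.pairwise_cons.mp hrest_pw).1 head hmem
        omega

lemma count_run (head : Int) (tl : List Int) (w : Int) :
    (head :: tl).count w =
      (if w = head then 1 + (tl.takeWhile (· == head)).length else 0) +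
        (tl.dropWhile (· == head)).count w := by
  have hdecomp : tl = tl.takeWhile (· == head) ++ tl.dropWhile (· == head) :=
    (List.takeWhile_append_dropWhile).symm
  by_cases hw : w = head
  · subst hw
    rw [List.count_cons_self]
    conv_lhs => rw [hdecomp]
    rw [List.count_append]
    have hlen : (tl.takeWhile (· == w)).count w = (tl.takeWhile (· == w)).length :=
      List.count_eq_length.mpr (fun y hy => (take_eq_head w tl y hy).symm ▸ rfl)
    rw [if_pos rfl]
    omega
  · rw [List.count_cons_of_ne (Ne.symm hw)]
    conv_lhs => rw [hdecomp]
    rw [List.count_append]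
    have hz : (tl.takeWhile (· == head)).count w = 0 :=
      List.count_eq_zero.mpr (fun hmem => hw (take_eq_head head tl w hmem))
    rw [if_neg hw]
    omega

lemma badRuns_subset (n : Int) (s : List Int) : ∀ v, v ∈ badRuns n s → v ∈ s := by
  induction s using badRuns.induct n with
  | case1 => intro v hv; simp [badRuns, PySem.Set.empty] at hv
  | case2 head tl hcond ih =>
      intro v hv
      rw [badRuns, if_pos hcond, PySem.Set.mem_add] at hv
      rcases hv with hv | hv
      · exact List.mem_cons_of_mem _ ((List.dropWhile_sublist _).subset (ih v hv))
      · simp [hv]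
  | case3 head tl hcond ih =>
      intro v hv
      rw [badRuns, if_neg hcond] at hv
      exact List.mem_cons_of_mem _ ((List.dropWhile_sublist _).subset (ih v hv))

-- On a (≤)-sorted list, for an element of the list, membership in badRuns is exactly count > n.
lemma mem_badRuns (n : Int) (s : List Int) (hs : s.Pairwise (· ≤ ·)) (v : Int) :
    v ∈ s → (v ∈ badRuns n s ↔ n < (s.count v : Int)) := by
  induction s using badRuns.induct n with
  | case1 => intro hv; simp at hv
  | case2 head tl hcond ih =>
      intro hv
      have hrest_pw : (tl.dropWhile (· == head)).Pairwise (· ≤ ·) :=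
        hs.of_cons.sublist (List.dropWhile_sublist _)
      rw [badRuns, if_pos hcond, PySem.Set.mem_add, count_run head tl v]
      by_cases hv' : v = head
      · subst hv'
        rw [if_pos rfl, count_drop_head v tl hs]
        push_cast
        constructor
        · intro _; omega
        · intro _; right; rfl
      · rw [List.mem_cons] at hv
        have hv_tl : v ∈ tl := hv.resolve_left hv'
        have hv_rest : v ∈ tl.dropWhile (· == head) := by
          conv at hv_tl => rw [(List.takeWhile_append_dropWhile (p := (· == head)) (l := tl)).symm]
          rcases List.mem_append.mp hv_tl with h | h
          · exact absurd (take_eq_head head tl v h) hv'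
          · exact h
        rw [ih hrest_pw hv_rest, if_neg hv']
        push_cast
        constructor
        · rintro (h | h)
          · omega
          · exact absurd h hv'
        · intro h; left; omega
  | case3 head tl hcond ih =>
      intro hv
      have hrest_pw : (tl.dropWhile (· == head)).Pairwise (· ≤ ·) :=
        hs.of_cons.sublist (List.dropWhile_sublist _)
      rw [badRuns, if_neg hcond, count_run head tl v]
      by_cases hv' : v = head
      · subst hv'
        rw [if_pos rfl, count_drop_head v tl hs]
        have hnot : v ∉ badRuns n (tl.dropWhile (· == v)) := by
          intro hmem
          have hv_rest : v ∈ tl.dropWhile (· == v) := badRuns_subset n _ v hmem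
          have := (ih hrest_pw hv_rest).mp hmem
          have h0 := count_drop_head v tl hs
          omega
        push_cast
        constructor
        · intro h; exact absurd h hnot
        · intro h; omega
      · rw [List.mem_cons] at hv
        have hv_tl : v ∈ tl := hv.resolve_left hv'
        have hv_rest : v ∈ tl.dropWhile (· == head) := by
          conv at hv_tl => rw [(List.takeWhile_append_dropWhile (p := (· == head)) (l := tl)).symm]
          rcases List.mem_append.mp hv_tl with h | h
          · exact absurd (take_eq_head head tl v h) hv'
          · exact h
        rw [ih hrest_pw hv_rest, if_neg hv']
        push_cast
        omega

-- A's two-branch counter step is the unconditional insert of getD+1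
lemma step_eq :
    (fun (d : PySem.Dict Int Int) (x : Int) =>
        if d.contains x then d.insert x (d.getD x 0 + 1) else d.insert x 1) =
    (fun (d : PySem.Dict Int Int) (x : Int) => d.insert x (d.getD x 0 + 1)) := by
  funext d x
  by_cases h : d.contains x = true
  · simp [h]
  · simp only [Bool.not_eq_true] at h
    rw [PySem.Dict.getD_of_not_contains d 0 h]
    simp [h]

-- ===== VERDICT (by name: the statement is the Claim_ definition above) =====
theorem solution_spec : Claim_equal_solution := by
  intro data n _
  unfold Spec_solution solution solution_alt
  rw [step_eq]
  refine List.filter_congr ?_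
  intro x hx
  rw [PySem.Dict.getD_foldl_insert_add_one, PySem.Dict.getD_empty]
  rw [scanRuns_eq_badRuns n _ 0]
  rw [List.drop_zero]
  have hsx : x ∈ PySem.List.sorted data (fun x => x) false :=
    (PySem.List.mem_sorted data (fun x => x) false x).mpr hx
  have hmem := mem_badRuns n (PySem.List.sorted data (fun x => x) false)
    (by simpa using PySem.List.sorted_pairwise data (fun x => x)) x hsx
  have hcnt : (PySem.List.sorted data (fun x => x) false).count x = data.count x :=
    (PySem.List.sorted_perm data (fun x => x) false).count_eq x
  rw [hcnt] at hmem
  simp only [PySem.Set.contains]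
  by_cases hb : x ∈ badRuns n (PySem.List.sorted data (fun x => x) false)
  · have := hmem.mp hb
    simp [hb]
    omega
  · have := hmem.not.mp hb
    simp [hb]
    omega
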